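-- pv_equiv track=rewrite | github.com/pypi-data/pypi-mirror-390 | packages/kousuan/kousuan-0.1.3.tar.gz/kousuan-0.1.3/kousuan/skills/calculators/multiply_by_nine.py | _is_nine_pattern
-- ===== SOURCE A (Python) =====
-- def _is_nine_pattern(num) -> tuple:
--     """检查是否为9、99、999等模式，返回(是否匹配, 位数, 基数)"""
--     num = int(num)
--     if num <= 0:
--         return False, 0, 0
--
--     str_num = str(num)
--     # 检查是否全为9
--     if all(d == '9' for d in str_num):
--         digits = len(str_num)
--         base = 10 ** digits  # 10, 100, 1000等
--         return True, digits, base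
--
--     return False, 0, 0
-- ===== SOURCE B (Python) =====
-- def _is_nine_pattern(num) -> tuple:
--     """Arithmetic all-nines test: num is all nines iff num+1 is a positive power of ten."""
--     num = int(num)
--     if num <= 0:
--         return False, 0, 0
--     m = num + 1
--     d = 0
--     while m % 10 == 0:
--         m //= 10
--         d += 1
--     if m == 1 and d > 0:
--         return True, d, num + 1
--     return False, 0, 0
-- ===== Notes on version B (the rewrite author's own statement) =====
-- stated objective: alternative
-- what changed: Replaces the string conversion and per-character all-'9' scan with pure arithmetic: strip trailing factors of ten from num+1; the number is all nines exactly when num+1 is a positive power of ten, which also yields the digit count and the base num+1 directly.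
import Mathlib
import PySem

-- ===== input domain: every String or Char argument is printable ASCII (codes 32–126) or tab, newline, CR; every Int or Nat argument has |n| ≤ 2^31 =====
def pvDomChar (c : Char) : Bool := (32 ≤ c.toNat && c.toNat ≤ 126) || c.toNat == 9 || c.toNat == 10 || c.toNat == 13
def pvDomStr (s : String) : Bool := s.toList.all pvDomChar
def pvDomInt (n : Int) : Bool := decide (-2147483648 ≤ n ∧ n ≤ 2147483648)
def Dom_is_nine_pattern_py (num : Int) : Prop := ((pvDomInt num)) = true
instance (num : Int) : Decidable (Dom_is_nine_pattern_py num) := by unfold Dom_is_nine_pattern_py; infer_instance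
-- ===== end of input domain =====

-- B replaces A's string-digit scan by an arithmetic power-of-ten test on num+1 (alternative, same cost).

-- ===== PORT A =====
-- str(num) is ported as PySem.Int.toChars (the char list of PySem.Int.toStr);
-- `all(d == '9' for d in str_num)` is the .all scan over those chars.
def is_nine_pattern_py (num : Int) : Bool × Int × Int :=
  if num ≤ 0 then (false, 0, 0)
  else
    let str_num := PySem.Int.toChars num
    if str_num.all (fun d => d == '9') then
      let digits : Int := (str_num.length : Int)
      let base : Int := 10 ^ str_num.length
      (true, digits, base)
    else (false, 0, 0)

-- ===== PORT B =====
-- the `while m % 10 == 0: m //= 10; d += 1` loop of Source B; m runs on Nat (m = num+1 > 0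
-- after the guard) and the `0 < m` conjunct is a pure totality guard for the recursion.
def pvStripTens (m : Nat) (d : Nat) : Nat × Nat :=
  if h : m % 10 = 0 ∧ 0 < m then pvStripTens (m / 10) (d + 1) else (m, d)
  termination_by m
  decreasing_by exact Nat.div_lt_self h.2 (by omega)

def is_nine_pattern_py_alt (num : Int) : Bool × Int × Int :=
  if num ≤ 0 then (false, 0, 0)
  else
    let r := pvStripTens (num + 1).toNat 0
    if r.1 = 1 ∧ 0 < r.2 then (true, (r.2 : Int), num + 1)
    else (false, 0, 0)

-- ===== PRECONDITION & SPEC =====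
def Spec_is_nine_pattern_py (num : Int) (out : Bool × Int × Int) : Prop := out = is_nine_pattern_py_alt num
instance (num : Int) (out : Bool × Int × Int) : Decidable (Spec_is_nine_pattern_py num out) := by unfold Spec_is_nine_pattern_py; infer_instance

-- ===== CLAIM (what is proved, stated in full; the proofs are below) =====
def Claim_equal_is_nine_pattern_py : Prop := ∀ (num : Int), Dom_is_nine_pattern_py num → Spec_is_nine_pattern_py num (is_nine_pattern_py num)

-- ===== LEMMAS AND PROOFS =====

-- fuel-free reformulation of Nat.toDigits 10
def rdigits (n : Nat) : List Char :=
  if _h : n < 10 then [Nat.digitChar n]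
  else rdigits (n / 10) ++ [Nat.digitChar (n % 10)]
  termination_by n
  decreasing_by exact Nat.div_lt_self (by omega) (by omega)

theorem toDigitsCore_append (f n : Nat) (acc : List Char) :
    Nat.toDigitsCore 10 f n acc = Nat.toDigitsCore 10 f n [] ++ acc := by
  induction f generalizing n acc with
  | zero => simp [Nat.toDigitsCore]
  | succ f ih =>
    simp only [Nat.toDigitsCore]
    split
    · simp
    · rw [ih (n / 10) ((n % 10).digitChar :: acc), ih (n / 10) [(n % 10).digitChar]]
      simp

theorem toDigitsCore_eq_rdigits (f n : Nat) (h : n < f) :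
    Nat.toDigitsCore 10 f n [] = rdigits n := by
  induction f generalizing n with
  | zero => omega
  | succ f ih =>
    rw [rdigits]
    simp only [Nat.toDigitsCore]
    split
    · have hn : n < 10 := by omega
      simp [hn, Nat.mod_eq_of_lt hn]
    · have hn : ¬ n < 10 := by omega
      rw [toDigitsCore_append, ih (n / 10) (by omega)]
      simp [hn]

theorem toDigits_eq_rdigits (n : Nat) : Nat.toDigits 10 n = rdigits n :=
  toDigitsCore_eq_rdigits (n + 1) n (by omega)

theorem rdigits_length_pos (n : Nat) : 0 < (rdigits n).length := by
  rw [rdigits]; split <;> simp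

theorem digitChar_eq_nine (d : Nat) (h : d < 10) : (Nat.digitChar d == '9') = decide (d = 9) := by
  interval_cases d <;> decide

-- all-nines characterisation: the digits of n are all '9' iff n + 1 = 10 ^ (number of digits)
theorem rdigits_all_nine (n : Nat) :
    (rdigits n).all (fun d => d == '9') = true ↔ n + 1 = 10 ^ (rdigits n).length := by
  induction n using Nat.strong_induction_on with
  | _ n ih =>
    rw [rdigits]
    by_cases h : n < 10
    · simp only [h, dite_true, List.all_cons, List.all_nil, Bool.and_true,
        digitChar_eq_nine n h, List.length_cons, List.length_nil, decide_eq_true_eq]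
      omega
    · have h10 : 10 ≤ n := by omega
      simp only [h, dite_false, List.all_append, List.all_cons, List.all_nil, Bool.and_true,
        List.length_append, List.length_cons, List.length_nil, Nat.zero_add]
      rw [digitChar_eq_nine (n % 10) (Nat.mod_lt n (by omega))]
      have hlp := rdigits_length_pos (n / 10)
      have hrec := ih (n / 10) (Nat.div_lt_self (by omega) (by omega))
      constructor
      · rintro h'
        simp only [Bool.and_eq_true, decide_eq_true_eq] at h'
        obtain ⟨h1, h2⟩ := h'
        have := hrec.mp h1
        have hd : n = 10 * (n / 10) + 9 := by omega
        rw [pow_succ]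
        omega
      · intro h'
        rw [pow_succ] at h'
        have hm : n % 10 = 9 := by omega
        have hq : n / 10 + 1 = 10 ^ (rdigits (n / 10)).length := by omega
        simp [hm, hrec.mpr hq]

-- length of the digit string of 10^k - 1
theorem rdigits_length_of_pow (k n : Nat) (hk : 0 < k) (h : n + 1 = 10 ^ k) :
    (rdigits n).length = k := by
  induction k generalizing n with
  | zero => omega
  | succ k ih =>
    by_cases hk0 : k = 0
    · subst hk0
      have : n = 9 := by omega
      subst this
      rw [rdigits]; simp
    · have hk1 : 0 < k := by omega
      have h10 : 10 ^ k ≥ 10 := by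
        calc 10 ^ 1 ≤ 10 ^ k := Nat.pow_le_pow_right (by omega) hk1
        _ = 10 ^ k := rfl
      have hn : ¬ n < 10 := by rw [pow_succ] at h; omega
      rw [rdigits]
      simp only [hn, dite_false, List.length_append, List.length_cons, List.length_nil]
      have hq : n / 10 + 1 = 10 ^ k := by rw [pow_succ] at h; omega
      rw [ih (n / 10) hk1 hq]

theorem pvStripTens_pow (k d : Nat) : pvStripTens (10 ^ k) d = (1, d + k) := by
  induction k generalizing d with
  | zero => rw [pvStripTens]; simp
  | succ k ih =>
    rw [pvStripTens]
    have h1 : 10 ^ (k + 1) % 10 = 0 := by simp [pow_succ]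
    have h2 : 0 < 10 ^ (k + 1) := Nat.pow_pos (by omega)
    have h3 : 10 ^ (k + 1) / 10 = 10 ^ k := by rw [pow_succ]; simp
    simp only [h1, h2, and_true, dite_true, h3, ih]
    simp; omega

theorem pvStripTens_le (m d : Nat) : d ≤ (pvStripTens m d).2 := by
  induction m using Nat.strong_induction_on generalizing d with
  | _ m ih =>
    rw [pvStripTens]
    split
    · rename_i h
      have := ih (m / 10) (Nat.div_lt_self h.2 (by omega)) (d + 1)
      omega
    · simp

theorem pvStripTens_one (m d : Nat) (hm : 0 < m) (h : (pvStripTens m d).1 = 1) :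
    m = 10 ^ ((pvStripTens m d).2 - d) := by
  induction m using Nat.strong_induction_on generalizing d with
  | _ m ih =>
    rw [pvStripTens] at h ⊢
    by_cases hc : m % 10 = 0 ∧ 0 < m
    · rw [dif_pos hc] at h ⊢
      have hq : 0 < m / 10 := by
        rcases Nat.eq_zero_or_pos (m / 10) with h0 | h0
        · have := Nat.div_add_mod m 10; omega
        · exact h0
      have := ih (m / 10) (Nat.div_lt_self hc.2 (by omega)) (d + 1) hq h
      have hle := pvStripTens_le (m / 10) (d + 1)
      have hmod := Nat.div_add_mod m 10
      have hexp : (pvStripTens (m / 10) (d + 1)).2 - d = ((pvStripTens (m / 10) (d + 1)).2 - (d + 1)) + 1 := by omega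
      rw [hexp, pow_succ]
      omega
    · rw [dif_neg hc] at h ⊢
      simpa using h
-- ===== VERDICT (by name: the statement is the Claim_ definition above) =====
theorem is_nine_pattern_py_spec : Claim_equal_is_nine_pattern_py := by
  intro num _
  unfold Spec_is_nine_pattern_py is_nine_pattern_py is_nine_pattern_py_alt
  by_cases hle : num ≤ 0
  · simp [hle]
  · simp only [hle, if_false]
    have hpos : 0 < num := by omega
    have hneg : ¬ num < 0 := by omega
    set n : Nat := num.toNat with hn
    have hnum : num = (n : Int) := by omega
    have htc : PySem.Int.toChars num = rdigits n := by
      simp [PySem.Int.toChars, hneg, toDigits_eq_rdigits]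
      rw [← hn]
    have htn : (num + 1).toNat = n + 1 := by omega
    rw [htc, htn]
    set L := (rdigits n).length with hL
    have hLpos : 0 < L := rdigits_length_pos n
    by_cases hA : n + 1 = 10 ^ L
    · -- all nines: both branches fire and agree
      have hall : (rdigits n).all (fun d => d == '9') = true := (rdigits_all_nine n).mpr hA
      rw [hA, pvStripTens_pow L 0]
      simp only [hall, if_true, Nat.zero_add]
      have hbase : (10 : Int) ^ L = num + 1 := by
        rw [hnum]
        have : ((10 ^ L : Nat) : Int) = (10 : Int) ^ L := by push_cast; ring
        omega
      simp [hLpos, hbase]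
    · -- not all nines: A's test is false, and B's loop cannot end at (1, d>0)
      have hall : ¬ (rdigits n).all (fun d => d == '9') = true := fun h => hA ((rdigits_all_nine n).mp h)
      simp only [hall]
      have hB : ¬ ((pvStripTens (n + 1) 0).1 = 1 ∧ 0 < (pvStripTens (n + 1) 0).2) := by
        rintro ⟨h1, h2⟩
        have hpow := pvStripTens_one (n + 1) 0 (by omega) h1
        simp only [Nat.sub_zero] at hpow
        have hlen := rdigits_length_of_pow _ n h2 hpow
        exact hA (by rw [hL, hlen]; exact hpow)
      simp [hB]
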